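-- pv_equiv track=rewrite | github.com/vinr515/NFL-Model | Prediction.py | checkWeek
-- ===== SOURCE A (Python) =====
-- def checkWeek(week, games):
--     if(type(week) == int):
--         return [week for i in range(len(games))]
--     if(len(week) < len(games)):
--         return week + [week[-1] for i in range(len(games)-len(week))]
--     if(len(week) > len(games)):
--         return week[:len(games)]
--     if(len(week) == len(games)):
--         return week
--     raise ValueError("Week should be an integer or list, not {}".format(type(week)))
-- ===== SOURCE B (Python) =====
-- def checkWeek(week, games):
--     if type(week) == int:
--         return [week for i in range(len(games))]
--     return [week[min(i, len(week)-1)] for i in range(len(games))]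
-- ===== Notes on version B (the rewrite author's own statement) =====
-- stated objective: simpler
-- what changed: Replaces the three length-comparison branches (pad with last element / truncate / return as-is) with a single clamped-index comprehension over range(len(games)).
import Mathlib
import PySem

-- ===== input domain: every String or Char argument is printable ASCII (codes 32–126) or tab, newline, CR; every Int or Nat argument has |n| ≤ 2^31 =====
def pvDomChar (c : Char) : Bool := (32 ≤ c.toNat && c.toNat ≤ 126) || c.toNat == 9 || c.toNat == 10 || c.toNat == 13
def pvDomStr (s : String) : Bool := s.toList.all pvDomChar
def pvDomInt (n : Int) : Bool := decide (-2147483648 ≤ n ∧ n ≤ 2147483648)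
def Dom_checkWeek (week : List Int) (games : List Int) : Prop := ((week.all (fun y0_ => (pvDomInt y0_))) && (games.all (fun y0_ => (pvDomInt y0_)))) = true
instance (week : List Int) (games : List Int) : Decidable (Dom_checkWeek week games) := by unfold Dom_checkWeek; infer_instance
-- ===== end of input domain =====

-- B replaces A's three length-comparison branches with one clamped-index comprehension (simpler decomposition).
-- Since week : List Int here, A's `type(week) == int` branch is never taken and is not ported.

-- ===== PORT A =====
def checkWeek (week : List Int) (games : List Int) : List Int :=
  if week.length < games.length then
    -- week + [week[-1] for i in range(len(games)-len(week))]; week[-1] via pyGetD, in range under Pre_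
    week ++ (PySem.List.pyRange 0 ((games.length : Int) - (week.length : Int)) 1).map
      (fun _ => PySem.List.pyGetD week (-1) 0)
  else if week.length > games.length then
    PySem.List.slice week none (some (games.length : Int))
  else
    week

-- ===== PORT B =====
def checkWeek_alt (week : List Int) (games : List Int) : List Int :=
  (PySem.List.pyRange 0 (games.length : Int) 1).map
    (fun i => PySem.List.pyGetD week (min i ((week.length : Int) - 1)) 0)

-- ===== PRECONDITION & SPEC =====
-- Pre_ excludes exactly the inputs where A raises IndexError (week = [] with games nonempty: week[-1]); B raises there too.
def Pre_checkWeek (week : List Int) (games : List Int) : Prop := week ≠ [] ∨ games = []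
instance (week : List Int) (games : List Int) : Decidable (Pre_checkWeek week games) := by unfold Pre_checkWeek; infer_instance
def pvWitness_checkWeek : List Int × List Int := ([1, 2], [3, 4, 5])

def Spec_checkWeek (week : List Int) (games : List Int) (out : List Int) : Prop := out = checkWeek_alt week games
instance (week : List Int) (games : List Int) (out : List Int) : Decidable (Spec_checkWeek week games out) := by unfold Spec_checkWeek; infer_instance

-- ===== CLAIM (what is proved, stated in full; the proofs are below) =====
def Claim_equal_checkWeek : Prop := ∀ (week : List Int) (games : List Int), Dom_checkWeek week games → Pre_checkWeek week games → Spec_checkWeek week games (checkWeek week games)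

-- ===== LEMMAS AND PROOFS =====

-- B written index-wise over Nats (week nonempty).
theorem checkWeek_alt_eq_map (week games : List Int) (h : week ≠ []) :
    checkWeek_alt week games =
      (List.range games.length).map (fun i => week[min i (week.length - 1)]'(by
        have hm : 0 < week.length := List.length_pos_of_ne_nil h
        omega)) := by
  unfold checkWeek_alt
  have hm : 0 < week.length := List.length_pos_of_ne_nil h
  rw [PySem.List.pyRange_one]
  simp only [zero_add, Int.sub_zero, Int.toNat_natCast, List.map_map]
  apply List.map_congr_left
  intro i _
  have h0 : (0 : Int) ≤ min (i : Int) ((week.length : Int) - 1) := by omega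
  have h1 : min (i : Int) ((week.length : Int) - 1) < (week.length : Int) := by omega
  have := PySem.List.pyGetD_eq_getElem (xs := week) (i := min (i : Int) ((week.length : Int) - 1)) (d := 0) h0 h1
  simp only [Function.comp_apply, this]
  congr 1
  omega

theorem checkWeek_spec_aux (week games : List Int) (h : week ≠ []) :
    checkWeek week games = checkWeek_alt week games := by
  rw [checkWeek_alt_eq_map week games h]
  have hm : 0 < week.length := List.length_pos_of_ne_nil h
  unfold checkWeek
  split_ifs with h1 h2
  · -- pad case: len week < len games
    rw [PySem.List.pyGetD_neg_one week 0 h, PySem.List.pyRange_one]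
    apply List.ext_getElem
    · simp; omega
    · intro i hi hi'
      simp only [List.getElem_map, List.getElem_range]
      have hLen : (week ++ (List.range ((games.length : Int) - (week.length : Int)).toNat).map
          (fun _ => week.getLast h)).length = games.length := by simp; omega
      by_cases hc : i < week.length
      · rw [List.getElem_append_left hc]
        congr 1
        omega
      · rw [List.getElem_append_right (by omega)]
        simp only [List.getElem_map]
        rw [List.getLast_eq_getElem]
        congr 1
        have h3 : i < week.length + (games.length - week.length) := by simpa using hi
        omega
  · -- truncate case: len week > len games
    rw [PySem.List.slice_to_natCast]
    apply List.ext_getElem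
    · simp; omega
    · intro i hi hi'
      have hig : i < games.length := by simp at hi; omega
      rw [List.getElem_take, List.getElem_map, List.getElem_range]
      congr 1
      omega
  · -- equal lengths
    have heq : week.length = games.length := by omega
    apply List.ext_getElem
    · simp [heq]
    · intro i hi hi'
      simp only [List.getElem_map, List.getElem_range]
      congr 1
      omega

-- ===== VERDICT (by name: the statement is the Claim_ definition above) =====
theorem checkWeek_spec : Claim_equal_checkWeek := by
  intro week games _ hpre
  unfold Spec_checkWeek
  rcases hpre with h | h
  · exact checkWeek_spec_aux week games h
  · subst h
    cases week with
    | nil => decide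
    | cons x xs => exact checkWeek_spec_aux (x :: xs) [] (by simp)
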